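-- pv_equiv track=rewrite | github.com/paiml/depyler | examples/hard_str_manacher.py | count_palindrome_centers
-- ===== SOURCE A (Python) =====
-- def manacher_odd(s: str) -> list[int]:
--     n: int = len(s)
--     p: list[int] = []
--     i: int = 0
--     while i < n:
--         p.append(0)
--         i = i + 1
--     if n == 0:
--         return p
--     p[0] = 0
--     center: int = 0
--     right: int = 0
--     i = 1
--     while i < n:
--         mirror: int = 2 * center - i
--         if i < right and mirror >= 0:
--             diff: int = right - i
--             if p[mirror] < diff:
--                 p[i] = p[mirror]
--             else:
--                 p[i] = diff
--         lo: int = i - p[i] - 1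
--         hi: int = i + p[i] + 1
--         while lo >= 0 and hi < n and s[lo] == s[hi]:
--             p[i] = p[i] + 1
--             lo = lo - 1
--             hi = hi + 1
--         if i + p[i] > right:
--             center = i
--             right = i + p[i]
--         i = i + 1
--     return p
--
-- def count_palindrome_centers(s: str) -> int:
--     p: list[int] = manacher_odd(s)
--     count: int = 0
--     i: int = 0
--     while i < len(p):
--         if p[i] > 0:
--             count = count + 1
--         i = i + 1
--     return count
-- ===== SOURCE B (Python) =====
-- def count_palindrome_centers(s: str) -> int:
--     return sum(1 for i in range(1, len(s) - 1) if s[i - 1] == s[i + 1])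
-- ===== Notes on version B (the rewrite author's own statement) =====
-- stated objective: simpler
-- what changed: Drops the Manacher radius computation entirely: since p[i] > 0 exactly when s[i-1] == s[i+1], B is a one-line scan counting positions whose two neighbours match.
import Mathlib
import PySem

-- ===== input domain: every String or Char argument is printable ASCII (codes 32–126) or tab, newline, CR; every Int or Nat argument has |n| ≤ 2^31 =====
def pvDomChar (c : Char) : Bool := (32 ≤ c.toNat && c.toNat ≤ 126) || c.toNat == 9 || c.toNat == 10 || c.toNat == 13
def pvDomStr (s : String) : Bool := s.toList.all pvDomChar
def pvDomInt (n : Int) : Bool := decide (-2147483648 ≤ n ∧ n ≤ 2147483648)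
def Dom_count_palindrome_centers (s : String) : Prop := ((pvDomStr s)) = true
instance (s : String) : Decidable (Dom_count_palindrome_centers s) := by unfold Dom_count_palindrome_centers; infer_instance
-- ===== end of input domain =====

-- B replaces the Manacher radius array by a direct one-line scan counting positions whose two neighbours match (simpler, same O(n) return value).


-- ===== PORT A =====
-- while i < n: p.append(0); i += 1
def pvZeros (n i : Int) (p : List Int) : List Int :=
  if i < n then pvZeros n (i + 1) (p ++ [0]) else p
termination_by (n - i).toNat
decreasing_by omega

-- inner expansion: while lo >= 0 and hi < n and s[lo] == s[hi]: p[i] += 1; lo -= 1; hi += 1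
def pvExpand (cs : List Char) (n i : Int) (p : List Int) (lo hi : Int) : List Int :=
  if 0 ≤ lo ∧ hi < n ∧ PySem.List.pyGet? cs lo = PySem.List.pyGet? cs hi then
    pvExpand cs n i (PySem.List.pySetD p i (PySem.List.pyGetD p i 0 + 1)) (lo - 1) (hi + 1)
  else p
termination_by (n - hi).toNat
decreasing_by omega

-- outer while loop of manacher_odd, state (p, center, right, i)
def pvOuter (cs : List Char) (n : Int) (p : List Int) (center right i : Int) : List Int :=
  if i < n then
    let mirror := 2 * center - i
    let p1 :=
      if i < right ∧ 0 ≤ mirror then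
        let diff := right - i
        if PySem.List.pyGetD p mirror 0 < diff then
          PySem.List.pySetD p i (PySem.List.pyGetD p mirror 0)
        else
          PySem.List.pySetD p i diff
      else p
    let pi0 := PySem.List.pyGetD p1 i 0
    let p2 := pvExpand cs n i p1 (i - pi0 - 1) (i + pi0 + 1)
    let r := PySem.List.pyGetD p2 i 0
    if i + r > right then pvOuter cs n p2 i (i + r) (i + 1)
    else pvOuter cs n p2 center right (i + 1)
  else p
termination_by (n - i).toNat
decreasing_by all_goals omega

def manacher_odd (s : String) : List Int :=
  let cs := s.toList
  let n : Int := (cs.length : Int)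
  let p := pvZeros n 0 []
  if n = 0 then p
  else
    let p := PySem.List.pySetD p 0 0
    pvOuter cs n p 0 0 1

-- while i < len(p): if p[i] > 0: count += 1; i += 1
def pvCount (p : List Int) (i count : Int) : Int :=
  if i < (p.length : Int) then
    pvCount p (i + 1) (if PySem.List.pyGetD p i 0 > 0 then count + 1 else count)
  else count
termination_by ((p.length : Int) - i).toNat
decreasing_by omega

def count_palindrome_centers (s : String) : Int :=
  pvCount (manacher_odd s) 0 0

-- ===== PORT B =====
def count_palindrome_centers_alt (s : String) : Int :=
  let cs := s.toList
  (PySem.List.pyRange 1 ((cs.length : Int) - 1) 1).foldl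
    (fun acc i => acc + (if PySem.List.pyGet? cs (i - 1) = PySem.List.pyGet? cs (i + 1) then 1 else 0)) 0

-- ===== PRECONDITION & SPEC =====
def Spec_count_palindrome_centers (s : String) (out : Int) : Prop := out = count_palindrome_centers_alt s
instance (s : String) (out : Int) : Decidable (Spec_count_palindrome_centers s out) := by unfold Spec_count_palindrome_centers; infer_instance

-- ===== CLAIM (what is proved, stated in full; the proofs are below) =====
def Claim_equal_count_palindrome_centers : Prop := ∀ (s : String), Dom_count_palindrome_centers s → Spec_count_palindrome_centers s (count_palindrome_centers s)

-- ===== LEMMAS AND PROOFS =====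

-- proof-side notions: a position is a "good" center iff its two neighbours exist and match
def pvGood (cs : List Char) (j : Int) : Prop :=
  1 ≤ j ∧ j + 1 < (cs.length : Int) ∧ PySem.List.pyGet? cs (j - 1) = PySem.List.pyGet? cs (j + 1)

-- r is a valid (not necessarily maximal) odd-palindrome radius at i
def pvVrad (cs : List Char) (i r : Int) : Prop :=
  ∀ k : Int, 1 ≤ k → k ≤ r →
    0 ≤ i - k ∧ i + k < (cs.length : Int) ∧ PySem.List.pyGet? cs (i - k) = PySem.List.pyGet? cs (i + k)

lemma pvVrad_nonpos (cs : List Char) (i r : Int) (h : r ≤ 0) : pvVrad cs i r := by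
  intro k hk1 hk2; omega

lemma pvZeros_eq (n i : Int) (p : List Int) :
    pvZeros n i p = p ++ List.replicate (n - i).toNat 0 := by
  rw [pvZeros]; split_ifs with h
  · rw [pvZeros_eq n (i + 1)]
    have e : (n - i).toNat = (n - (i + 1)).toNat + 1 := by omega
    rw [e, List.replicate_succ]; simp
  · have e : (n - i).toNat = 0 := by omega
    simp [e]
termination_by (n - i).toNat
decreasing_by omega

lemma pvGetSet (p : List Int) (i j v : Int) (h0 : 0 ≤ i) (h : i < (p.length : Int)) (hj : 0 ≤ j) :
    PySem.List.pyGetD (PySem.List.pySetD p i v) j 0 = if j = i then v else PySem.List.pyGetD p j 0 := by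
  have hi' : i = ((i.toNat : Nat) : Int) := (Int.toNat_of_nonneg h0).symm
  have hj' : j = ((j.toNat : Nat) : Int) := (Int.toNat_of_nonneg hj).symm
  rw [hi', hj', PySem.List.pyGetD_pySetD_natCast _ _ _ _ _ (by omega), ← hi', ← hj']
  by_cases hc : j = i
  · rw [if_pos (by omega : j.toNat = i.toNat), if_pos hc]
  · rw [if_neg (by omega : ¬ j.toNat = i.toNat), if_neg hc]

lemma pvSetSelf (p : List Int) (i : Int) (h0 : 0 ≤ i) (h : i < (p.length : Int)) :
    PySem.List.pySetD p i (PySem.List.pyGetD p i 0) = p := by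
  rw [PySem.List.pySetD_of_nonneg _ _ h0, PySem.List.pyGetD_eq_getElem _ _ h0 h]
  exact List.set_getElem_self (by omega)

lemma pvSetSet (p : List Int) (i v w : Int) (h0 : 0 ≤ i) :
    PySem.List.pySetD (PySem.List.pySetD p i v) i w = PySem.List.pySetD p i w := by
  rw [PySem.List.pySetD_of_nonneg _ _ h0, PySem.List.pySetD_of_nonneg _ _ h0,
      PySem.List.pySetD_of_nonneg _ _ h0, List.set_set]

-- the expansion loop: starting from a valid radius p[i], it returns p with p[i] replaced by a
-- valid radius that can no longer be extended
lemma pvExpand_spec (cs : List Char) (i : Int) :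
    ∀ (fuel : Nat) (p : List Int),
      (p.length : Int) = (cs.length : Int) → 0 ≤ i → i < (cs.length : Int) →
      0 ≤ PySem.List.pyGetD p i 0 →
      pvVrad cs i (PySem.List.pyGetD p i 0) →
      ((cs.length : Int) - (i + PySem.List.pyGetD p i 0 + 1)).toNat ≤ fuel →
      ∃ r', pvExpand cs (cs.length : Int) i p (i - PySem.List.pyGetD p i 0 - 1) (i + PySem.List.pyGetD p i 0 + 1)
              = PySem.List.pySetD p i r'
        ∧ PySem.List.pyGetD p i 0 ≤ r' ∧ pvVrad cs i r'
        ∧ ¬(0 ≤ i - r' - 1 ∧ i + r' + 1 < (cs.length : Int) ∧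
             PySem.List.pyGet? cs (i - r' - 1) = PySem.List.pyGet? cs (i + r' + 1)) := by
  intro fuel
  induction fuel with
  | zero =>
    intro p hp hi0 hin hr0 hv hf
    rw [pvExpand]; split_ifs with hc
    · obtain ⟨h1, h2, h3⟩ := hc; exfalso; omega
    · exact ⟨_, (pvSetSelf p i hi0 (by omega)).symm, le_refl _, hv, hc⟩
  | succ f IH =>
    intro p hp hi0 hin hr0 hv hf
    rw [pvExpand]; split_ifs with hc
    · obtain ⟨h1, h2, h3⟩ := hc
      set r := PySem.List.pyGetD p i 0 with hr
      set p' := PySem.List.pySetD p i (r + 1) with hp'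
      have hlen' : ((p'.length : Nat) : Int) = (cs.length : Int) := by
        rw [hp', PySem.List.length_pySetD]; exact hp
      have hget' : PySem.List.pyGetD p' i 0 = r + 1 := by
        rw [hp', pvGetSet p i i _ hi0 (by omega) hi0, if_pos rfl]
      have hv' : pvVrad cs i (r + 1) := by
        intro k hk1 hk2
        rcases eq_or_lt_of_le hk2 with he | hlt
        · refine ⟨by omega, by omega, ?_⟩
          rw [show i - k = i - r - 1 by omega, show i + k = i + r + 1 by omega]
          exact h3
        · exact hv k hk1 (by omega)
      obtain ⟨r', heq, hle, hvr, hstop⟩ :=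
        IH p' hlen' hi0 hin (by rw [hget']; omega) (by rw [hget']; exact hv') (by rw [hget']; omega)
      rw [hget'] at heq hle
      refine ⟨r', ?_, by omega, hvr, hstop⟩
      rw [show i - r - 1 - 1 = i - (r + 1) - 1 by ring, show i + r + 1 + 1 = i + (r + 1) + 1 by ring,
          heq, hp', pvSetSet p i (r + 1) r' hi0]
    · exact ⟨_, (pvSetSelf p i hi0 (by omega)).symm, le_refl _, hv, hc⟩

-- the mirror-seeding argument: a value bounded by both p[mirror] and right - i is a valid radius at i
lemma pvSeed_vrad (cs : List Char) (c i pc pm seed : Int)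
    (hvc : pvVrad cs c pc) (hvm : pvVrad cs (2 * c - i) pm)
    (hc0 : 0 ≤ c) (hci : c < i)
    (hs1 : seed ≤ pm) (hs2 : seed ≤ c + pc - i) : pvVrad cs i seed := by
  intro k hk1 hk2
  obtain ⟨hA1, hA2, hA3⟩ := hvc (i + k - c) (by omega) (by omega)
  rw [show c - (i + k - c) = 2 * c - i - k by ring] at hA1
  rw [show c + (i + k - c) = i + k by ring] at hA2
  rw [show c - (i + k - c) = 2 * c - i - k by ring, show c + (i + k - c) = i + k by ring] at hA3
  obtain ⟨hM1, hM2, hM3⟩ := hvm k hk1 (by omega)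
  have hB : PySem.List.pyGet? cs (i - k) = PySem.List.pyGet? cs (2 * c - i + k) ∧ 0 ≤ i - k := by
    rcases lt_trichotomy (i - k - c) 0 with hd | hd | hd
    · obtain ⟨hB1, hB2, hB3⟩ := hvc (c - (i - k)) (by omega) (by omega)
      rw [show c - (c - (i - k)) = i - k by ring] at hB1
      rw [show c - (c - (i - k)) = i - k by ring, show c + (c - (i - k)) = 2 * c - i + k by ring] at hB3
      exact ⟨hB3, hB1⟩
    · exact ⟨by rw [show i - k = 2 * c - i + k by omega], by omega⟩
    · obtain ⟨hB1, hB2, hB3⟩ := hvc (i - k - c) (by omega) (by omega)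
      rw [show c - (i - k - c) = 2 * c - i + k by ring, show c + (i - k - c) = i - k by ring] at hB3
      exact ⟨hB3.symm, by omega⟩
  exact ⟨hB.2, hA2, by rw [hB.1, ← hM3, hA3]⟩

-- the outer-loop invariant
def pvInv (cs : List Char) (p : List Int) (center right i : Int) : Prop :=
  (p.length : Int) = (cs.length : Int) ∧ 1 ≤ i ∧ 0 ≤ center ∧ center < i ∧
  right = center + PySem.List.pyGetD p center 0 ∧
  (∀ j, 0 ≤ j → j < i → pvVrad cs j (PySem.List.pyGetD p j 0)) ∧
  (∀ j, pvGood cs j → j < i → 1 ≤ PySem.List.pyGetD p j 0) ∧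
  (∀ j, i ≤ j → j < (cs.length : Int) → PySem.List.pyGetD p j 0 = 0) ∧
  (∀ j, 0 ≤ j → j < (cs.length : Int) → 0 ≤ PySem.List.pyGetD p j 0)

lemma pvOuter_spec (cs : List Char) :
    ∀ (fuel : Nat) (p : List Int) (center right i : Int),
      ((cs.length : Int) - i).toNat ≤ fuel → pvInv cs p center right i →
      ∀ j, 0 ≤ j → j < (cs.length : Int) →
        (0 < PySem.List.pyGetD (pvOuter cs (cs.length : Int) p center right i) j 0 ↔ pvGood cs j) := by
  intro fuel
  induction fuel with
  | zero =>
    intro p c r i hf hinv j hj0 hjn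
    obtain ⟨hlen, hi1, hc0, hci, hrt, hV, hM, hZ, hN⟩ := hinv
    rw [pvOuter, if_neg (by omega : ¬ i < (cs.length : Int))]
    constructor
    · intro hpos
      obtain ⟨h1, h2, h3⟩ := hV j hj0 (by omega) 1 (by omega) (by omega)
      exact ⟨by omega, by omega, h3⟩
    · intro hg; have := hM j hg (by omega); omega
  | succ f IH =>
    intro p c r i hf hinv j hj0 hjn
    obtain ⟨hlen, hi1, hc0, hci, hrt, hV, hM, hZ, hN⟩ := hinv
    by_cases hin : i < (cs.length : Int)
    case neg =>
      rw [pvOuter, if_neg hin]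
      constructor
      · intro hpos
        obtain ⟨h1, h2, h3⟩ := hV j hj0 (by omega) 1 (by omega) (by omega)
        exact ⟨by omega, by omega, h3⟩
      · intro hg; have := hM j hg (by omega); omega
    case pos =>
      have hstep : pvOuter cs (cs.length : Int) p c r i =
          (let p1 := if i < r ∧ 0 ≤ 2 * c - i then
              (if PySem.List.pyGetD p (2 * c - i) 0 < r - i then
                PySem.List.pySetD p i (PySem.List.pyGetD p (2 * c - i) 0)
              else PySem.List.pySetD p i (r - i))
            else p
           let p2 := pvExpand cs (cs.length : Int) i p1
              (i - PySem.List.pyGetD p1 i 0 - 1) (i + PySem.List.pyGetD p1 i 0 + 1)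
           if i + PySem.List.pyGetD p2 i 0 > r then
             pvOuter cs (cs.length : Int) p2 i (i + PySem.List.pyGetD p2 i 0) (i + 1)
           else pvOuter cs (cs.length : Int) p2 c r (i + 1)) := by
        rw [pvOuter, if_pos hin]
      rw [hstep]
      set p1 := (if i < r ∧ 0 ≤ 2 * c - i then
              (if PySem.List.pyGetD p (2 * c - i) 0 < r - i then
                PySem.List.pySetD p i (PySem.List.pyGetD p (2 * c - i) 0)
              else PySem.List.pySetD p i (r - i))
            else p) with hp1def
      have hpi0 : PySem.List.pyGetD p i 0 = 0 := hZ i (le_refl i) hin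
      -- the properties of p1 we need
      have hP1 : ((p1.length : Nat) : Int) = (cs.length : Int) ∧ 0 ≤ PySem.List.pyGetD p1 i 0 ∧
          pvVrad cs i (PySem.List.pyGetD p1 i 0) ∧
          (∀ j', 0 ≤ j' → j' ≠ i → PySem.List.pyGetD p1 j' 0 = PySem.List.pyGetD p j' 0) := by
        rw [hp1def]
        split_ifs with hb hpm
        · -- seeded with p[mirror]
          have hmlt : 2 * c - i < i := by omega
          have hseed := pvSeed_vrad cs c i (PySem.List.pyGetD p c 0) (PySem.List.pyGetD p (2 * c - i) 0)
            (PySem.List.pyGetD p (2 * c - i) 0) (hV c hc0 hci) (hV (2 * c - i) hb.2 (by omega))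
            hc0 hci (le_refl _) (by omega)
          refine ⟨by rw [PySem.List.length_pySetD]; exact hlen, ?_, ?_, ?_⟩
          · rw [pvGetSet p i i _ (by omega) (by omega) (by omega), if_pos rfl]
            exact hN (2 * c - i) hb.2 (by omega)
          · rw [pvGetSet p i i _ (by omega) (by omega) (by omega), if_pos rfl]
            exact hseed
          · intro j' hj'0 hj'i
            rw [pvGetSet p i j' _ (by omega) (by omega) hj'0, if_neg hj'i]
        · -- seeded with diff = right - i
          have hseed := pvSeed_vrad cs c i (PySem.List.pyGetD p c 0) (PySem.List.pyGetD p (2 * c - i) 0)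
            (r - i) (hV c hc0 hci) (hV (2 * c - i) hb.2 (by omega))
            hc0 hci (by omega) (by omega)
          refine ⟨by rw [PySem.List.length_pySetD]; exact hlen, ?_, ?_, ?_⟩
          · rw [pvGetSet p i i _ (by omega) (by omega) (by omega), if_pos rfl]; omega
          · rw [pvGetSet p i i _ (by omega) (by omega) (by omega), if_pos rfl]
            exact hseed
          · intro j' hj'0 hj'i
            rw [pvGetSet p i j' _ (by omega) (by omega) hj'0, if_neg hj'i]
        · -- no seeding: p1 = p, p[i] = 0
          exact ⟨hlen, by rw [hpi0], by rw [hpi0]; exact pvVrad_nonpos cs i 0 (le_refl 0), fun _ _ _ => rfl⟩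
      obtain ⟨hP1len, hP1nn, hP1v, hP1other⟩ := hP1
      obtain ⟨R, hReq, hRle, hRv, hRstop⟩ :=
        pvExpand_spec cs i ((cs.length : Int) - (i + PySem.List.pyGetD p1 i 0 + 1)).toNat p1
          hP1len (by omega) hin hP1nn hP1v (le_refl _)
      have hR0 : 0 ≤ R := le_trans hP1nn hRle
      have hp2len : (((PySem.List.pySetD p1 i R).length : Nat) : Int) = (cs.length : Int) := by
        rw [PySem.List.length_pySetD]; exact hP1len
      have hget2 : ∀ j', 0 ≤ j' → PySem.List.pyGetD (PySem.List.pySetD p1 i R) j' 0 =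
          if j' = i then R else PySem.List.pyGetD p j' 0 := by
        intro j' hj'0
        rw [pvGetSet p1 i j' R (by omega) (by omega) hj'0]
        split_ifs with he
        · rfl
        · exact hP1other j' hj'0 he
      have hget2i : PySem.List.pyGetD (PySem.List.pySetD p1 i R) i 0 = R := by
        rw [hget2 i (by omega), if_pos rfl]
      -- the invariant for the next iteration, shared components
      have hV2 : ∀ j', 0 ≤ j' → j' < i + 1 → pvVrad cs j' (PySem.List.pyGetD (PySem.List.pySetD p1 i R) j' 0) := by
        intro j' hj'0 hj'i
        rw [hget2 j' hj'0]
        split_ifs with he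
        · exact he ▸ hRv
        · exact hV j' hj'0 (by omega)
      have hM2 : ∀ j', pvGood cs j' → j' < i + 1 → 1 ≤ PySem.List.pyGetD (PySem.List.pySetD p1 i R) j' 0 := by
        intro j' hg hj'i
        obtain ⟨hg1, hg2, hg3⟩ := hg
        rw [hget2 j' (by omega)]
        split_ifs with he
        · by_contra hcon
          have hR00 : R = 0 := by omega
          apply hRstop
          rw [hR00]
          subst he
          refine ⟨by omega, by omega, ?_⟩
          rw [show j' - 0 - 1 = j' - 1 by ring, show j' + 0 + 1 = j' + 1 by ring]
          exact hg3
        · exact hM j' ⟨hg1, hg2, hg3⟩ (by omega)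
      have hZ2 : ∀ j', i + 1 ≤ j' → j' < (cs.length : Int) → PySem.List.pyGetD (PySem.List.pySetD p1 i R) j' 0 = 0 := by
        intro j' h1 h2
        rw [hget2 j' (by omega), if_neg (by omega)]
        exact hZ j' (by omega) h2
      have hN2 : ∀ j', 0 ≤ j' → j' < (cs.length : Int) → 0 ≤ PySem.List.pyGetD (PySem.List.pySetD p1 i R) j' 0 := by
        intro j' h1 h2
        rw [hget2 j' h1]
        split_ifs with he
        · exact hR0
        · exact hN j' h1 h2
      have hfuel2 : ((cs.length : Int) - (i + 1)).toNat ≤ f := by omega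
      simp only [hReq]
      split_ifs with hbr
      · exact IH (PySem.List.pySetD p1 i R) i (i + PySem.List.pyGetD (PySem.List.pySetD p1 i R) i 0) (i + 1) hfuel2
          ⟨hp2len, by omega, by omega, by omega, by rw [hget2i], hV2, hM2, hZ2, hN2⟩ j hj0 hjn
      · refine IH (PySem.List.pySetD p1 i R) c r (i + 1) hfuel2
          ⟨hp2len, by omega, hc0, by omega, ?_, hV2, hM2, hZ2, hN2⟩ j hj0 hjn
        rw [hget2 c hc0, if_neg (by omega)]
        exact hrt

lemma pvGetZeros (N : Nat) (j : Int) :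
    PySem.List.pyGetD (List.replicate N (0 : Int)) j 0 = 0 := by
  by_cases hr : PySem.Raise.InRange (List.replicate N (0 : Int)).length j
  · exact List.eq_of_mem_replicate (PySem.List.pyGetD_mem _ _ hr)
  · exact PySem.List.pyGetD_of_none _ _ _ ((PySem.List.pyGet?_eq_none_iff _ _).mpr hr)

lemma pvExpand_len (cs : List Char) (n i : Int) :
    ∀ (fuel : Nat) (p : List Int) (lo hi : Int), (n - hi).toNat ≤ fuel →
      (pvExpand cs n i p lo hi).length = p.length := by
  intro fuel
  induction fuel with
  | zero =>
    intro p lo hi hf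
    rw [pvExpand]; split_ifs with hc
    · obtain ⟨h1, h2, h3⟩ := hc; exfalso; omega
    · rfl
  | succ f IH =>
    intro p lo hi hf
    rw [pvExpand]; split_ifs with hc
    · obtain ⟨h1, h2, h3⟩ := hc
      rw [IH _ _ _ (by omega), PySem.List.length_pySetD]
    · rfl

lemma pvOuter_len (cs : List Char) (n : Int) :
    ∀ (fuel : Nat) (p : List Int) (c r i : Int), (n - i).toNat ≤ fuel →
      (pvOuter cs n p c r i).length = p.length := by
  intro fuel
  induction fuel with
  | zero =>
    intro p c r i hf
    rw [pvOuter]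
    split_ifs with hc
    · exfalso; omega
    · rfl
  | succ f IH =>
    intro p c r i hf
    by_cases hin : i < n
    · have hstep : pvOuter cs n p c r i =
          (let p1 := if i < r ∧ 0 ≤ 2 * c - i then
              (if PySem.List.pyGetD p (2 * c - i) 0 < r - i then
                PySem.List.pySetD p i (PySem.List.pyGetD p (2 * c - i) 0)
              else PySem.List.pySetD p i (r - i))
            else p
           let p2 := pvExpand cs n i p1
              (i - PySem.List.pyGetD p1 i 0 - 1) (i + PySem.List.pyGetD p1 i 0 + 1)
           if i + PySem.List.pyGetD p2 i 0 > r then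
             pvOuter cs n p2 i (i + PySem.List.pyGetD p2 i 0) (i + 1)
           else pvOuter cs n p2 c r (i + 1)) := by
        rw [pvOuter, if_pos hin]
      rw [hstep]
      have hlen1 : ∀ (q : List Int), (pvExpand cs n i q
          (i - PySem.List.pyGetD q i 0 - 1) (i + PySem.List.pyGetD q i 0 + 1)).length = q.length :=
        fun q => pvExpand_len cs n i _ q _ _ (le_refl _)
      split_ifs <;> rw [apply_ite List.length] <;>
        simp only [IH _ _ _ _ (by omega : (n - (i+1)).toNat ≤ f), hlen1, PySem.List.length_pySetD, ite_self]
    · rw [pvOuter, if_neg hin]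

lemma pvManacher_step (s : String) (h0 : ¬ ((s.toList.length : Nat) : Int) = 0) :
    manacher_odd s = pvOuter s.toList (s.toList.length : Int)
      (PySem.List.pySetD (List.replicate s.toList.length 0) 0 0) 0 0 1 := by
  rw [manacher_odd]
  simp only [if_neg h0, pvZeros_eq]
  simp

lemma pvManacher_char (s : String) :
    ∀ j, 0 ≤ j → j < (s.toList.length : Int) →
      (0 < PySem.List.pyGetD (manacher_odd s) j 0 ↔ pvGood s.toList j) := by
  intro j hj0 hjn
  have h0 : ¬ ((s.toList.length : Nat) : Int) = 0 := by omega
  rw [pvManacher_step s h0]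
  have hlen0 : (((PySem.List.pySetD (List.replicate s.toList.length (0 : Int)) 0 0).length : Nat) : Int)
      = (s.toList.length : Int) := by
    rw [PySem.List.length_pySetD, List.length_replicate]
  have hg0 : ∀ j', 0 ≤ j' →
      PySem.List.pyGetD (PySem.List.pySetD (List.replicate s.toList.length (0 : Int)) 0 0) j' 0 = 0 := by
    intro j' hj'
    rw [pvGetSet _ 0 j' 0 (le_refl 0) (by rw [List.length_replicate]; omega) hj']
    split_ifs
    · rfl
    · exact pvGetZeros _ _
  refine pvOuter_spec s.toList ((s.toList.length : Int) - 1).toNat _ 0 0 1 (le_refl _)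
    ⟨hlen0, le_refl 1, le_refl 0, by omega, ?_, ?_, ?_, ?_, ?_⟩ j hj0 hjn
  · rw [hg0 0 (le_refl 0)]
    omega
  · intro j' h1 h2
    rw [hg0 j' h1]
    exact pvVrad_nonpos _ _ _ (le_refl 0)
  · intro j' hgj h2
    obtain ⟨hgj1, _, _⟩ := hgj
    omega
  · intro j' h1 h2
    exact hg0 j' (by omega)
  · intro j' h1 h2
    rw [hg0 j' h1]

lemma pvManacher_len (s : String) : (manacher_odd s).length = s.toList.length := by
  by_cases h0 : ((s.toList.length : Nat) : Int) = 0
  · rw [manacher_odd]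
    simp only [if_pos h0, pvZeros_eq]
    simp only [List.nil_append, List.length_replicate]
    omega
  · rw [pvManacher_step s h0,
        pvOuter_len s.toList (s.toList.length : Int) ((s.toList.length : Int) - 1).toNat _ 0 0 1 (le_refl _),
        PySem.List.length_pySetD, List.length_replicate]

lemma pvCount_eq (p : List Int) :
    ∀ (fuel : Nat) (i count : Int), 0 ≤ i → ((p.length : Int) - i).toNat ≤ fuel →
      pvCount p i count
        = count + ((PySem.List.pyRange i (p.length : Int) 1).countP
            (fun j => decide (0 < PySem.List.pyGetD p j 0)) : Int) := by
  intro fuel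
  induction fuel with
  | zero =>
    intro i count hi0 hf
    rw [pvCount, if_neg (by omega), PySem.List.pyRange_one_eq_nil (by omega)]
    simp
  | succ f IH =>
    intro i count hi0 hf
    by_cases h : i < (p.length : Int)
    · rw [pvCount, if_pos h, IH (i + 1) _ (by omega) (by omega),
          PySem.List.pyRange_one_cons h, List.countP_cons]
      by_cases hp : PySem.List.pyGetD p i 0 > 0
      · rw [if_pos hp]
        simp only [hp, decide_true, if_true]
        push_cast
        ring
      · rw [if_neg hp]
        simp only [hp, decide_false]
        push_cast
        ring
    · rw [pvCount, if_neg h, PySem.List.pyRange_one_eq_nil (by omega)]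
      simp

lemma pvCountP_range_eq (s : String) :
    ((PySem.List.pyRange 0 (s.toList.length : Int) 1).countP
        (fun j => decide (0 < PySem.List.pyGetD (manacher_odd s) j 0)))
      = ((PySem.List.pyRange 1 ((s.toList.length : Int) - 1) 1).countP
        (fun j => decide (PySem.List.pyGet? s.toList (j - 1) = PySem.List.pyGet? s.toList (j + 1)))) := by
  have hchar := pvManacher_char s
  by_cases h1 : ((s.toList.length : Nat) : Int) ≤ 1
  · rw [PySem.List.pyRange_one_eq_nil (by omega : (s.toList.length : Int) - 1 ≤ 1)]
    have e1 : PySem.List.pyRange 0 1 1 = [0] := by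
      have := PySem.List.pyRange_one_singleton (0 : Int)
      rw [show (0 : Int) + 1 = 1 by ring] at this
      exact this
    rcases Nat.lt_or_ge s.toList.length 1 with h | h
    · rw [PySem.List.pyRange_one_eq_nil (by omega)]
      simp
    · have hn1 : ((s.toList.length : Nat) : Int) = 1 := by omega
      rw [hn1, e1]
      simp only [List.countP_cons, List.countP_nil]
      have hz0 : ¬ (0 < PySem.List.pyGetD (manacher_odd s) 0 0) := by
        rw [hchar 0 (le_refl 0) (by omega)]
        intro hg
        exact absurd hg.1 (by omega)
      simp [hz0]
  · have hsplit : PySem.List.pyRange 0 (s.toList.length : Int) 1 =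
        PySem.List.pyRange 0 1 1 ++ (PySem.List.pyRange 1 ((s.toList.length : Int) - 1) 1
          ++ PySem.List.pyRange ((s.toList.length : Int) - 1) (s.toList.length : Int) 1) := by
      rw [← PySem.List.pyRange_one_append 1 ((s.toList.length : Int) - 1) _ (by omega) (by omega),
          ← PySem.List.pyRange_one_append 0 1 _ (by omega) (by omega)]
    have e1 : PySem.List.pyRange 0 1 1 = [0] := by
      have := PySem.List.pyRange_one_singleton (0 : Int)
      rw [show (0 : Int) + 1 = 1 by ring] at this
      exact this
    have e2 : PySem.List.pyRange ((s.toList.length : Int) - 1) (s.toList.length : Int) 1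
        = [(s.toList.length : Int) - 1] := by
      have := PySem.List.pyRange_one_singleton ((s.toList.length : Int) - 1)
      rw [show (s.toList.length : Int) - 1 + 1 = (s.toList.length : Int) by ring] at this
      exact this
    rw [hsplit, List.countP_append, List.countP_append, e1, e2]
    have hz0 : ¬ (0 < PySem.List.pyGetD (manacher_odd s) 0 0) := by
      rw [hchar 0 (le_refl 0) (by omega)]
      intro hg
      exact absurd hg.1 (by omega)
    have hzl : ¬ (0 < PySem.List.pyGetD (manacher_odd s) ((s.toList.length : Int) - 1) 0) := by
      rw [hchar _ (by omega) (by omega)]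
      intro hg
      exact absurd hg.2.1 (by omega)
    have hmid : (PySem.List.pyRange 1 ((s.toList.length : Int) - 1) 1).countP
          (fun j => decide (0 < PySem.List.pyGetD (manacher_odd s) j 0))
        = (PySem.List.pyRange 1 ((s.toList.length : Int) - 1) 1).countP
          (fun j => decide (PySem.List.pyGet? s.toList (j - 1) = PySem.List.pyGet? s.toList (j + 1))) := by
      apply List.countP_congr
      intro x hx
      rw [PySem.List.mem_pyRange_one] at hx
      simp only [decide_eq_true_eq]
      rw [hchar x (by omega) (by omega)]
      constructor
      · intro hg; exact hg.2.2
      · intro he; exact ⟨by omega, by omega, he⟩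
    have d0 : (decide (0 < PySem.List.pyGetD (manacher_odd s) 0 0)) = false := decide_eq_false hz0
    have dl : (decide (0 < PySem.List.pyGetD (manacher_odd s) ((s.toList.length : Int) - 1) 0)) = false :=
      decide_eq_false hzl
    rw [List.countP_cons, List.countP_cons, List.countP_nil, d0, dl, hmid]
    simp

-- ===== VERDICT (by name: the statement is the Claim_ definition above) =====
theorem count_palindrome_centers_spec : Claim_equal_count_palindrome_centers := by
  intro s _
  unfold Spec_count_palindrome_centers
  have hA : count_palindrome_centers s
      = 0 + (((PySem.List.pyRange 0 (s.toList.length : Int) 1).countP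
          (fun j => decide (0 < PySem.List.pyGetD (manacher_odd s) j 0))) : Int) := by
    rw [count_palindrome_centers,
        pvCount_eq (manacher_odd s) (manacher_odd s).length 0 0 (le_refl 0) (by omega),
        pvManacher_len s]
  have hB : count_palindrome_centers_alt s
      = 0 + ((List.map (fun j => if PySem.List.pyGet? s.toList (j - 1)
            = PySem.List.pyGet? s.toList (j + 1) then (1 : Int) else 0)
          (PySem.List.pyRange 1 ((s.toList.length : Int) - 1) 1)).sum) := by
    rw [count_palindrome_centers_alt]
    exact PySem.List.foldl_add _ _ _
  have hmapf : (fun j => if PySem.List.pyGet? s.toList (j - 1)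
        = PySem.List.pyGet? s.toList (j + 1) then (1 : Int) else 0)
      = (fun j => if (fun j' => decide (PySem.List.pyGet? s.toList (j' - 1)
        = PySem.List.pyGet? s.toList (j' + 1))) j = true then (1 : Int) else 0) := by
    funext j
    by_cases h : PySem.List.pyGet? s.toList (j - 1) = PySem.List.pyGet? s.toList (j + 1) <;> simp [h]
  rw [hA, hB, hmapf, PySem.List.sum_map_ite_one_zero, pvCountP_range_eq s]
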